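-- pv_equiv track=rewrite | github.com/RobbeW/Data_Statistiek_R | Deel 3 Algoritmiek/03 Hogere dimensie/Evaluatie/04 Grootste waarde/solution/solution.nl.py | index_grootste_waarde
-- ===== SOURCE A (Python) =====
-- def index_grootste_waarde(matrix):
--     rM, cM = 0, 0
--     grootste = matrix[0][0]
--
--     for r in range(len(matrix)):
--         for c in range(len(matrix[0])):
--             if matrix[r][c] > grootste:
--                 grootste = matrix[r][c]
--                 rM, cM = r, c
--
--     return (rM, cM)
-- ===== SOURCE B (Python) =====
-- def index_grootste_waarde(matrix):
--     best = None  # (value, row, col)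
--     for r, row in enumerate(matrix):
--         # first column index of this row's maximum over the first w columns
--         cbest = 0
--         for c in range(1, len(matrix[0])):
--             if row[c] > row[cbest]:
--                 cbest = c
--         v = row[cbest]
--         if best is None or v > best[0]:
--             best = (v, r, cbest)
--     return (best[1], best[2])
-- ===== Notes on version B (the rewrite author's own statement) =====
-- stated objective: alternative
-- what changed: A keeps one running global maximum updated inside a row-major double scan; B is decomposed into two phases — per row it first finds the first-occurrence column argmax (seeded at column 0, strict >), then folds these row results into an Option-carried global best across rows — returning the same first occurrence of the matrix maximum.
-- outside the precondition, e.g. on index_grootste_waarde([[1, 2], [3]]): A raises IndexError, B raises IndexError; on index_grootste_waarde([]): A raises IndexError, B raises TypeError; on index_grootste_waarde([[]]): A raises IndexError, B raises IndexError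
import Mathlib
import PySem

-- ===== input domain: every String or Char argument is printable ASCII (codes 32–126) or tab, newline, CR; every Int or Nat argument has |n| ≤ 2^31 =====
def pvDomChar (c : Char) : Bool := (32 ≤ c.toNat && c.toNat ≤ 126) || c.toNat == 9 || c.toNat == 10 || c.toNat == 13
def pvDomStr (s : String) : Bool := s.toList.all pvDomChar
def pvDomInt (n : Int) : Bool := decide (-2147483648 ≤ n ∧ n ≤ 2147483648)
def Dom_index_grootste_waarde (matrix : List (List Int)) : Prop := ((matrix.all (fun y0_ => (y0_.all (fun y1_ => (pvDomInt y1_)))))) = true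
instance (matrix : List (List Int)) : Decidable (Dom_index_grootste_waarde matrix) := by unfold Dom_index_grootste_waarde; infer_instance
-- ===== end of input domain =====

-- B restructures A's single running-maximum scan into two phases (per-row first
-- argmax, then a cross-row best kept in an Option) — objective: alternative
-- decomposition, same cost.

-- ===== PORT A =====
def index_grootste_waarde (matrix : List (List Int)) : Int × Int :=
  let grootste := PySem.List.pyGetD (PySem.List.pyGetD matrix 0 []) 0 0
  let s := (PySem.List.pyRange 0 (PySem.List.len matrix) 1).foldl
    (fun (s : Int × Int × Int) r =>
      (PySem.List.pyRange 0 (PySem.List.len (PySem.List.pyGetD matrix 0 [])) 1).foldl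
        (fun (s : Int × Int × Int) c =>
          if PySem.List.pyGetD (PySem.List.pyGetD matrix r []) c 0 > s.2.2 then
            (r, c, PySem.List.pyGetD (PySem.List.pyGetD matrix r []) c 0)
          else s) s)
    (0, 0, grootste)
  (s.1, s.2.1)

-- ===== PORT B =====
def index_grootste_waarde_alt (matrix : List (List Int)) : Int × Int :=
  let best := (PySem.List.enumerate matrix 0).foldl
    (fun (best : Option (Int × Int × Int)) rrow =>
      let row := rrow.2
      let cbest := (PySem.List.pyRange 1 (PySem.List.len (PySem.List.pyGetD matrix 0 [])) 1).foldl
        (fun (cbest : Int) c =>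
          if PySem.List.pyGetD row c 0 > PySem.List.pyGetD row cbest 0 then c else cbest) 0
      let v := PySem.List.pyGetD row cbest 0
      match best with
      | none => some (v, rrow.1, cbest)
      | some b => if v > b.1 then some (v, rrow.1, cbest) else some b)
    none
  match best with
  | none => (0, 0)
  | some b => (b.2.1, b.2.2)

-- ===== PRECONDITION & SPEC =====
-- Pre_ excludes exactly the inputs on which the Python A raises (IndexError):
-- an empty matrix, an empty first row, or a row shorter than the first row.
def Pre_index_grootste_waarde (matrix : List (List Int)) : Prop :=
  matrix ≠ [] ∧ (matrix.headD []) ≠ [] ∧ ∀ row ∈ matrix, (matrix.headD []).length ≤ row.length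
instance (matrix : List (List Int)) : Decidable (Pre_index_grootste_waarde matrix) := by
  unfold Pre_index_grootste_waarde; infer_instance
def pvWitness_index_grootste_waarde : List (List Int) := [[1, 5], [7, 2]]
def Spec_index_grootste_waarde (matrix : List (List Int)) (out : Int × Int) : Prop := out = index_grootste_waarde_alt matrix
instance (matrix : List (List Int)) (out : Int × Int) : Decidable (Spec_index_grootste_waarde matrix out) := by unfold Spec_index_grootste_waarde; infer_instance

-- ===== CLAIM (what is proved, stated in full; the proofs are below) =====
def Claim_equal_index_grootste_waarde : Prop := ∀ (matrix : List (List Int)), Dom_index_grootste_waarde matrix → Pre_index_grootste_waarde matrix → Spec_index_grootste_waarde matrix (index_grootste_waarde matrix)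

-- ===== LEMMAS AND PROOFS =====

-- First-argmax state after scanning columns 0..n of `row`: (index, value).
def pvRow (row : List Int) : Nat → Int × Int
  | 0 => (0, PySem.List.pyGetD row 0 0)
  | n+1 =>
      let p := pvRow row n
      if PySem.List.pyGetD row ((n : Int) + 1) 0 > p.2
      then (((n : Int) + 1), PySem.List.pyGetD row ((n : Int) + 1) 0)
      else p

theorem pvRow_val (row : List Int) (n : Nat) :
    (pvRow row n).2 = PySem.List.pyGetD row (pvRow row n).1 0 := by
  induction n with
  | zero => rfl
  | succ n ih => simp only [pvRow]; split <;> simp [ih]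

theorem pvRow_zero_or (row : List Int) (n : Nat) :
    pvRow row n = (0, PySem.List.pyGetD row 0 0) ∨ (pvRow row n).2 > PySem.List.pyGetD row 0 0 := by
  induction n with
  | zero => exact Or.inl rfl
  | succ n ih =>
      simp only [pvRow]
      split
      · rename_i hgt
        right
        rcases ih with h | h
        · rw [h] at hgt; simp only at hgt; exact hgt
        · simpa using gt_trans hgt h
      · exact ih

-- A's inner column loop, characterised by pvRow.
theorem innerA_eq (row : List Int) (r : Int) (n : Nat) (s : Int × Int × Int) :
    (PySem.List.pyRange 0 ((n : Int) + 1) 1).foldl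
      (fun (s : Int × Int × Int) c =>
        if PySem.List.pyGetD row c 0 > s.2.2 then (r, c, PySem.List.pyGetD row c 0) else s) s
    = (if (pvRow row n).2 > s.2.2 then (r, (pvRow row n).1, (pvRow row n).2) else s) := by
  induction n generalizing s with
  | zero =>
      rw [show ((0:Nat):Int) + 1 = 0 + 1 by norm_num, PySem.List.pyRange_one_singleton]
      simp [pvRow]
  | succ n ih =>
      rw [show ((n+1:Nat):Int) + 1 = ((n:Int)+1) + 1 by push_cast; ring,
          PySem.List.pyRange_one_succ_right (by omega : (0:Int) ≤ (n:Int)+1), List.foldl_append, ih]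
      simp only [List.foldl, pvRow]
      rcases pvRow_zero_or row n with h0 | h0 <;> split_ifs <;> simp_all <;> omega

-- B's inner column loop, characterised by pvRow.
theorem innerB_eq (row : List Int) (n : Nat) :
    (PySem.List.pyRange 1 ((n : Int) + 1) 1).foldl
      (fun (cbest : Int) c =>
        if PySem.List.pyGetD row c 0 > PySem.List.pyGetD row cbest 0 then c else cbest) 0
    = (pvRow row n).1 := by
  induction n with
  | zero => rw [show ((0:Nat):Int) + 1 = (1:Int) by norm_num, PySem.List.pyRange_one_eq_nil (by omega)]; rfl
  | succ n ih =>
      rw [show ((n+1:Nat):Int) + 1 = ((n:Int)+1) + 1 by push_cast; ring,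
          PySem.List.pyRange_one_succ_right (by omega : (1:Int) ≤ (n:Int)+1), List.foldl_append, ih]
      simp only [List.foldl, pvRow, ← pvRow_val]
      split <;> rfl

-- Joint outer-loop invariant: after k+1 rows, B's Option state carries exactly
-- A's state (value, rowindex, colindex).
theorem outer_eq (matrix : List (List Int)) (m : Nat)
    (hw : PySem.List.len (PySem.List.pyGetD matrix 0 []) = (m : Int) + 1) (k : Nat) :
    (PySem.List.pyRange 0 ((k : Int) + 1) 1).foldl
      (fun (best : Option (Int × Int × Int)) r =>
        let row := PySem.List.pyGetD matrix r []
        let cbest := (PySem.List.pyRange 1 (PySem.List.len (PySem.List.pyGetD matrix 0 [])) 1).foldl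
          (fun (cbest : Int) c =>
            if PySem.List.pyGetD row c 0 > PySem.List.pyGetD row cbest 0 then c else cbest) 0
        let v := PySem.List.pyGetD row cbest 0
        match best with
        | none => some (v, r, cbest)
        | some b => if v > b.1 then some (v, r, cbest) else some b) none
    = some ((((PySem.List.pyRange 0 ((k : Int) + 1) 1).foldl
      (fun (s : Int × Int × Int) r =>
        (PySem.List.pyRange 0 (PySem.List.len (PySem.List.pyGetD matrix 0 [])) 1).foldl
          (fun (s : Int × Int × Int) c =>
            if PySem.List.pyGetD (PySem.List.pyGetD matrix r []) c 0 > s.2.2 then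
              (r, c, PySem.List.pyGetD (PySem.List.pyGetD matrix r []) c 0)
            else s) s)
      (0, 0, PySem.List.pyGetD (PySem.List.pyGetD matrix 0 []) 0 0)).2.2,
      ((PySem.List.pyRange 0 ((k : Int) + 1) 1).foldl
      (fun (s : Int × Int × Int) r =>
        (PySem.List.pyRange 0 (PySem.List.len (PySem.List.pyGetD matrix 0 [])) 1).foldl
          (fun (s : Int × Int × Int) c =>
            if PySem.List.pyGetD (PySem.List.pyGetD matrix r []) c 0 > s.2.2 then
              (r, c, PySem.List.pyGetD (PySem.List.pyGetD matrix r []) c 0)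
            else s) s)
      (0, 0, PySem.List.pyGetD (PySem.List.pyGetD matrix 0 []) 0 0)).1,
      ((PySem.List.pyRange 0 ((k : Int) + 1) 1).foldl
      (fun (s : Int × Int × Int) r =>
        (PySem.List.pyRange 0 (PySem.List.len (PySem.List.pyGetD matrix 0 [])) 1).foldl
          (fun (s : Int × Int × Int) c =>
            if PySem.List.pyGetD (PySem.List.pyGetD matrix r []) c 0 > s.2.2 then
              (r, c, PySem.List.pyGetD (PySem.List.pyGetD matrix r []) c 0)
            else s) s)
      (0, 0, PySem.List.pyGetD (PySem.List.pyGetD matrix 0 []) 0 0)).2.1)) := by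
  induction k with
  | zero =>
      rw [show ((0:Nat):Int) + 1 = 0 + 1 by norm_num, PySem.List.pyRange_one_singleton]
      simp only [List.foldl, hw, innerA_eq, innerB_eq]
      rcases pvRow_zero_or (PySem.List.pyGetD matrix 0 []) m with h0 | h0
      · rw [h0]; simp
      · rw [if_pos (by rw [pvRow_val] at h0 ⊢; simpa using h0)]
        simp [← pvRow_val]
  | succ k ih =>
      rw [show ((k+1:Nat):Int) + 1 = ((k:Int)+1) + 1 by push_cast; ring,
          PySem.List.pyRange_one_succ_right (by omega : (0:Int) ≤ (k:Int)+1),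
          List.foldl_append, List.foldl_append, ih]
      simp only [List.foldl, hw, innerA_eq, innerB_eq]
      rw [← pvRow_val]
      split <;> rfl

-- ===== VERDICT (by name: the statement is the Claim_ definition above) =====
theorem index_grootste_waarde_spec : Claim_equal_index_grootste_waarde := by
  intro matrix _ hpre
  obtain ⟨hne, hrow0, _⟩ := hpre
  unfold Spec_index_grootste_waarde index_grootste_waarde index_grootste_waarde_alt
  obtain ⟨k, hk⟩ : ∃ k : Nat, matrix.length = k + 1 :=
    ⟨matrix.length - 1, by cases matrix <;> simp_all⟩
  have hrow0' : matrix.headD [] = PySem.List.pyGetD matrix 0 [] := by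
    cases matrix <;> simp [PySem.List.pyGetD_zero]
  obtain ⟨m, hm⟩ : ∃ m : Nat, (PySem.List.pyGetD matrix 0 []).length = m + 1 := by
    rw [← hrow0']
    exact ⟨(matrix.headD []).length - 1, by cases h : matrix.headD [] <;> simp_all⟩
  have hw : PySem.List.len (PySem.List.pyGetD matrix 0 []) = (m : Int) + 1 := by
    simp [PySem.List.len_eq, hm]
  have hlen : PySem.List.len matrix = (k : Int) + 1 := by
    simp [PySem.List.len_eq, hk]
  rw [PySem.List.enumerate_eq_map_pyRange matrix ([] : List Int)]
  simp only [List.foldl_map, hlen]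
  rw [outer_eq matrix m hw k]
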